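-- pv_equiv track=rewrite | github.com/mukuldesai/ZeroDay | data_sources/ticket_fetcher.py | _extract_github_priority
-- ===== SOURCE A (Python) =====
-- from typing import List, Dict, Any, Optional
--
-- def _extract_github_priority(issue: Dict) -> str:
--     labels = [label.get('name', '').lower() for label in issue.get('labels', [])]
--
--     if any('critical' in label or 'urgent' in label for label in labels):
--         return 'Critical'
--     elif any('high' in label for label in labels):
--         return 'High'
--     elif any('low' in label for label in labels):
--         return 'Low'
--     else:
--         return 'Medium'
-- ===== SOURCE B (Python) =====
-- def _extract_github_priority(issue):
--     best = 3
--     for label in issue.get('labels', []):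
--         name = label.get('name', '').lower()
--         if 'critical' in name or 'urgent' in name:
--             cand = 0
--         elif 'high' in name:
--             cand = 1
--         elif 'low' in name:
--             cand = 2
--         else:
--             cand = 3
--         if cand < best:
--             best = cand
--     return ('Critical', 'High', 'Low', 'Medium')[best]
-- ===== Notes on version B (the rewrite author's own statement) =====
-- stated objective: alternative
-- what changed: Replaces three sequential any() scans over the label list with a single pass that keeps a running minimum severity rank per label and maps the final rank to the priority string.
import Mathlib
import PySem

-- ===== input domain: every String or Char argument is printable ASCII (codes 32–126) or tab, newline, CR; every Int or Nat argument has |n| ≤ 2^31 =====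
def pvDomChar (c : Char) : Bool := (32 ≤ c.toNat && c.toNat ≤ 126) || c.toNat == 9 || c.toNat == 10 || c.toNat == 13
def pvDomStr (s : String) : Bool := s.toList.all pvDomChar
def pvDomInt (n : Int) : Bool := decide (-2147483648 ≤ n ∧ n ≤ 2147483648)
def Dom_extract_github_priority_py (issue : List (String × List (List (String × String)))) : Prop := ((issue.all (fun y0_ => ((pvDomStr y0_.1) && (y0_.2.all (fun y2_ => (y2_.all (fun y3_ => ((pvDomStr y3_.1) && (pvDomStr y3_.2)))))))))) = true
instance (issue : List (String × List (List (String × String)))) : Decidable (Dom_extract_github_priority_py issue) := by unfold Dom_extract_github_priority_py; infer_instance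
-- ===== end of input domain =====

-- B replaces three sequential any() scans with one pass keeping a running minimum severity rank (alternative decomposition, same cost class).

-- ===== PORT A =====
def extract_github_priority_py (issue : List (String × List (List (String × String)))) : String :=
  let labels := ((PySem.Dict.ofList issue).getD "labels" []).map
    (fun label => PySem.Str.lower ((PySem.Dict.ofList label).getD "name" ""))
  if labels.any (fun label => PySem.Str.isIn "critical" label || PySem.Str.isIn "urgent" label) then
    "Critical"
  else if labels.any (fun label => PySem.Str.isIn "high" label) then
    "High"
  else if labels.any (fun label => PySem.Str.isIn "low" label) then
    "Low"
  else
    "Medium"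

-- ===== PORT B =====
-- rank of one lowered label name, as in Source B's if/elif chain
def pvRank (name : String) : Nat :=
  if PySem.Str.isIn "critical" name || PySem.Str.isIn "urgent" name then 0
  else if PySem.Str.isIn "high" name then 1
  else if PySem.Str.isIn "low" name then 2
  else 3

def extract_github_priority_py_alt (issue : List (String × List (List (String × String)))) : String :=
  let best := ((PySem.Dict.ofList issue).getD "labels" []).foldl
    (fun best label =>
      let cand := pvRank (PySem.Str.lower ((PySem.Dict.ofList label).getD "name" ""))
      if cand < best then cand else best) 3
  -- ('Critical', 'High', 'Low', 'Medium')[best]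
  if best = 0 then "Critical" else if best = 1 then "High" else if best = 2 then "Low" else "Medium"

-- ===== PRECONDITION & SPEC =====
def Spec_extract_github_priority_py (issue : List (String × List (List (String × String)))) (out : String) : Prop := out = extract_github_priority_py_alt issue
instance (issue : List (String × List (List (String × String)))) (out : String) : Decidable (Spec_extract_github_priority_py issue out) := by unfold Spec_extract_github_priority_py; infer_instance

-- ===== CLAIM (what is proved, stated in full; the proofs are below) =====
def Claim_equal_extract_github_priority_py : Prop := ∀ (issue : List (String × List (List (String × String)))), Dom_extract_github_priority_py issue → Spec_extract_github_priority_py issue (extract_github_priority_py issue)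

-- ===== LEMMAS AND PROOFS =====

-- B's running-minimum fold over the lowered names equals the rank A's any-chain would assign.
set_option maxHeartbeats 1000000 in
theorem pvFold_char (ns : List String) (b : Nat) (hb : b ≤ 3) :
    ns.foldl (fun best n => if pvRank n < best then pvRank n else best) b
      = min b (if ns.any (fun n => PySem.Str.isIn "critical" n || PySem.Str.isIn "urgent" n) then 0
        else if ns.any (fun n => PySem.Str.isIn "high" n) then 1
        else if ns.any (fun n => PySem.Str.isIn "low" n) then 2
        else 3) := by
  induction ns generalizing b with
  | nil => simp [Nat.min_def]; omega
  | cons n ns ih =>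
    have hr : pvRank n ≤ 3 := by unfold pvRank; split_ifs <;> omega
    have hstep : (if pvRank n < b then pvRank n else b) ≤ 3 := by split <;> omega
    simp only [List.foldl_cons, List.any_cons, Bool.or_eq_true, ih _ hstep]
    have hmin : (if pvRank n < b then pvRank n else b) = min b (pvRank n) := by
      split <;> omega
    rw [hmin]
    unfold pvRank
    simp only [Bool.or_eq_true]
    split_ifs <;> first | omega | (exfalso; tauto)

-- ===== VERDICT (by name: the statement is the Claim_ definition above) =====
theorem extract_github_priority_py_spec : Claim_equal_extract_github_priority_py := by
  intro issue _
  unfold Spec_extract_github_priority_py extract_github_priority_py extract_github_priority_py_alt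
  have h := pvFold_char (((PySem.Dict.ofList issue).getD "labels" []).map
      (fun label => PySem.Str.lower ((PySem.Dict.ofList label).getD "name" ""))) 3 (by omega)
  simp only [List.foldl_map, List.any_map] at h
  simp only [List.any_map]
  rw [h]
  split_ifs <;> simp_all [Nat.min_def]
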